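-- pv_equiv track=rewrite | github.com/Niche1337/SoccerLeague | league_builder.py | team_creator
-- ===== SOURCE A (Python) =====
-- def team_creator(players):
--     sharks = []
--     dragons = []
--     raptors = []
--     exp_yes = []
--     exp_no = []
--     '''The team creator function splits the players from the soccer.csv,
--         into three evenly distrubted teams based on soccer experience
--         It takes a list containing the players, and return three even distributed lists
--     '''
--     for player in players:
--         if player["Soccer Experience"] == "YES":
--             exp_yes.append(player)
--         else:
--             exp_no.append(player)
--
--     for player in exp_yes:
--         if len(sharks) != 3:
--             sharks.append(player)
--         elif len(dragons) != 3:
--             dragons.append(player)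
--         elif len(raptors) != 3:
--             raptors.append(player)
--
--     for player in exp_no:
--         if len(sharks) != 6:
--             sharks.append(player)
--         elif len(dragons) != 6:
--             dragons.append(player)
--         elif len(raptors) != 6:
--             raptors.append(player)
--
--     return sharks, dragons, raptors
-- ===== SOURCE B (Python) =====
-- def team_creator(players):
--     exp_yes = [p for p in players if p["Soccer Experience"] == "YES"]
--     exp_no = [p for p in players if p["Soccer Experience"] != "YES"]
--     sharks = exp_yes[0:3]
--     dragons = exp_yes[3:6]
--     raptors = exp_yes[6:9]
--     c0 = 6 - len(sharks)
--     c1 = 6 - len(dragons)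
--     c2 = 6 - len(raptors)
--     sharks += exp_no[0:c0]
--     dragons += exp_no[c0:c0 + c1]
--     raptors += exp_no[c0 + c1:c0 + c1 + c2]
--     return sharks, dragons, raptors
-- ===== Notes on version B (the rewrite author's own statement) =====
-- stated objective: alternative
-- what changed: Replaces A's three sequential append loops (partition loop plus two capacity-checking fill loops) with filter-based partition and direct list slicing using cumulative capacity offsets.
import Mathlib
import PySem

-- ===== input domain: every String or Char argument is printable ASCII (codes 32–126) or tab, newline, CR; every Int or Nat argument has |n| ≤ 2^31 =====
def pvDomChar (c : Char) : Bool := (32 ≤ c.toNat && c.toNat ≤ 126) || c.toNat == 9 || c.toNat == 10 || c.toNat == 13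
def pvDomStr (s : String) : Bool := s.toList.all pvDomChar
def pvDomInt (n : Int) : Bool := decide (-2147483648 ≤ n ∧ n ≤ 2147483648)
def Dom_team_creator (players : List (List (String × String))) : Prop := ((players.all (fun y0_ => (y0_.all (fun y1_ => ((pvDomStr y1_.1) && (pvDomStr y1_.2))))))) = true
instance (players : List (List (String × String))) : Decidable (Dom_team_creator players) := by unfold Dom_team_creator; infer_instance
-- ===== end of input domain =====

-- B replaces A's three append loops with a filter partition and slice arithmetic; equivalence is on the return value.

-- shared helper: player["Soccer Experience"] == "YES" (first-match association-list lookup, Python dict semantics)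
def pvIsYes (p : List (String × String)) : Bool :=
  (PySem.Dict.mk p).get? "Soccer Experience" == some "YES"

-- ===== PORT A =====
-- step of A's fill loops: append to the first of the three teams whose length is not yet c (c = 3 then 6)
def pvFillStep (c : Nat)
    (st : (List (List (String × String))) × (List (List (String × String))) × (List (List (String × String))))
    (player : List (String × String)) :
    (List (List (String × String))) × (List (List (String × String))) × (List (List (String × String))) :=
  if st.1.length != c then (st.1 ++ [player], st.2.1, st.2.2)
  else if st.2.1.length != c then (st.1, st.2.1 ++ [player], st.2.2)
  else if st.2.2.length != c then (st.1, st.2.1, st.2.2 ++ [player])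
  else st

def team_creator (players : List (List (String × String))) : (List (List (String × String))) × (List (List (String × String))) × (List (List (String × String))) :=
  let part := players.foldl
    (fun (st : List (List (String × String)) × List (List (String × String))) player =>
      if pvIsYes player then (st.1 ++ [player], st.2) else (st.1, st.2 ++ [player]))
    ([], [])
  let exp_yes := part.1
  let exp_no := part.2
  let st1 := exp_yes.foldl (pvFillStep 3) ([], [], [])
  let st2 := exp_no.foldl (pvFillStep 6) st1
  st2

-- ===== PORT B =====
def team_creator_alt (players : List (List (String × String))) : (List (List (String × String))) × (List (List (String × String))) × (List (List (String × String))) :=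
  let exp_yes := players.filter pvIsYes
  let exp_no := players.filter (fun p => !pvIsYes p)
  let sharks := PySem.List.slice exp_yes (some 0) (some 3)
  let dragons := PySem.List.slice exp_yes (some 3) (some 6)
  let raptors := PySem.List.slice exp_yes (some 6) (some 9)
  let c0 : Int := 6 - sharks.length
  let c1 : Int := 6 - dragons.length
  let c2 : Int := 6 - raptors.length
  (sharks ++ PySem.List.slice exp_no (some 0) (some c0),
   dragons ++ PySem.List.slice exp_no (some c0) (some (c0 + c1)),
   raptors ++ PySem.List.slice exp_no (some (c0 + c1)) (some (c0 + c1 + c2)))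

-- ===== PRECONDITION & SPEC =====
-- Pre_ excludes only players missing the "Soccer Experience" key, on which Python A raises KeyError (B raises too).
def Pre_team_creator (players : List (List (String × String))) : Prop :=
  (players.all (fun p => p.any (fun kv => kv.1 == "Soccer Experience"))) = true
instance (players : List (List (String × String))) : Decidable (Pre_team_creator players) := by unfold Pre_team_creator; infer_instance

def pvWitness_team_creator : (List (List (String × String))) :=
  [[("Name", "A"), ("Soccer Experience", "YES")], [("Name", "B"), ("Soccer Experience", "NO")]]

def Spec_team_creator (players : List (List (String × String))) (out : (List (List (String × String))) × (List (List (String × String))) × (List (List (String × String)))) : Prop := out = team_creator_alt players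
instance (players : List (List (String × String))) (out : (List (List (String × String))) × (List (List (String × String))) × (List (List (String × String)))) : Decidable (Spec_team_creator players out) := by unfold Spec_team_creator; infer_instance

-- ===== CLAIM (what is proved, stated in full; the proofs are below) =====
def Claim_equal_team_creator : Prop := ∀ (players : List (List (String × String))), Dom_team_creator players → Pre_team_creator players → Spec_team_creator players (team_creator players)

-- ===== LEMMAS AND PROOFS =====

-- A's partition loop builds the two filters
lemma pvPartition (q : List (String × String) → Bool)
    (l : List (List (String × String))) (a b : List (List (String × String))) :
    l.foldl (fun st player => if q player then (st.1 ++ [player], st.2) else (st.1, st.2 ++ [player])) (a, b)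
      = (a ++ l.filter q, b ++ l.filter (fun p => !q p)) := by
  induction l generalizing a b with
  | nil => simp
  | cons x xs ih =>
      by_cases hq : q x = true <;>
        simp [hq, ih]

-- A's fill loop with capacity c, from any state with room ≤ c, is take/drop slicing
lemma pvFill (c : Nat) (xs : List (List (String × String)))
    (s d r : List (List (String × String)))
    (hs : s.length ≤ c) (hd : d.length ≤ c) (hr : r.length ≤ c) :
    xs.foldl (pvFillStep c) (s, d, r)
      = (s ++ xs.take (c - s.length),
         d ++ (xs.drop (c - s.length)).take (c - d.length),
         r ++ (xs.drop ((c - s.length) + (c - d.length))).take (c - r.length)) := by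
  induction xs generalizing s d r with
  | nil => simp
  | cons x xs ih =>
      by_cases h1 : s.length = c
      · by_cases h2 : d.length = c
        · by_cases h3 : r.length = c
          · simp only [List.foldl_cons, pvFillStep, h1, h2, h3, bne_self_eq_false,
              Bool.false_eq_true, if_false]
            rw [ih s d r hs hd hr]
            simp [h1, h2, h3]
          · have hne : (r.length != c) = true := by simp; omega
            simp only [List.foldl_cons, pvFillStep, h1, h2, bne_self_eq_false,
              Bool.false_eq_true, if_false, hne, if_true]
            rw [ih s d (r ++ [x]) hs hd (by simp; omega)]
            have e1 : c - s.length = 0 := by omega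
            have e2 : c - d.length = 0 := by omega
            have e3 : c - r.length = (c - (r ++ [x]).length) + 1 := by simp; omega
            simp [e1, e2, e3, List.take_succ_cons]
        · have hne : (d.length != c) = true := by simp; omega
          simp only [List.foldl_cons, pvFillStep, h1, bne_self_eq_false,
            Bool.false_eq_true, if_false, hne, if_true]
          rw [ih s (d ++ [x]) r hs (by simp; omega) hr]
          have e1 : c - s.length = 0 := by omega
          have e2 : c - d.length = (c - (d ++ [x]).length) + 1 := by simp; omega
          simp [e1, e2, List.take_succ_cons]
      · have hne : (s.length != c) = true := by simp; omega
        simp only [List.foldl_cons, pvFillStep, hne, if_true]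
        rw [ih (s ++ [x]) d r (by simp; omega) hd hr]
        have e1 : c - s.length = (c - (s ++ [x]).length) + 1 := by simp; omega
        simp [e1, List.take_succ_cons, Nat.add_right_comm]

theorem team_creator_spec : Claim_equal_team_creator := by
  intro players _ _
  unfold Spec_team_creator team_creator team_creator_alt
  rw [pvPartition]
  simp only [List.nil_append]
  set ey := players.filter pvIsYes with hey
  set en := players.filter (fun p => !pvIsYes p) with hen
  rw [pvFill 3 ey [] [] [] (by simp) (by simp) (by simp)]
  simp only [List.length_nil, Nat.sub_zero, List.nil_append]
  have l1 : (ey.take 3).length ≤ 6 := by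
    have := List.length_take_le 3 ey; omega
  have l2 : ((ey.drop 3).take 3).length ≤ 6 := by
    have := List.length_take_le 3 (ey.drop 3); omega
  have l3 : ((ey.drop (3 + 3)).take 3).length ≤ 6 := by
    have := List.length_take_le 3 (ey.drop (3 + 3)); omega
  rw [pvFill 6 en _ _ _ l1 l2 l3]
  -- identify B's slices with take/drop
  have s03 : PySem.List.slice ey (some 0) (some 3) = ey.take 3 := by
    have := PySem.List.slice_natCast ey 0 3
    simp at this; simp [this]
  have s36 : PySem.List.slice ey (some 3) (some 6) = (ey.drop 3).take 3 := by
    simpa using PySem.List.slice_natCast ey 3 6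
  have s69 : PySem.List.slice ey (some 6) (some 9) = (ey.drop 6).take 3 := by
    simpa using PySem.List.slice_natCast ey 6 9
  rw [s03, s36, s69]
  set n0 := 6 - (ey.take 3).length with hn0
  set n1 := 6 - ((ey.drop 3).take 3).length with hn1
  set n2 := 6 - ((ey.drop 6).take 3).length with hn2
  have c0 : (6 : Int) - (ey.take 3).length = (n0 : Int) := by
    have := List.length_take_le 3 ey; omega
  have c1 : (6 : Int) - ((ey.drop 3).take 3).length = (n1 : Int) := by
    have := List.length_take_le 3 (ey.drop 3); omega
  have c2 : (6 : Int) - ((ey.drop 6).take 3).length = (n2 : Int) := by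
    have := List.length_take_le 3 (ey.drop 6); omega
  rw [c0, c1, c2]
  have b1 : PySem.List.slice en (some 0) (some (n0 : Int)) = en.take n0 := by
    simpa using PySem.List.slice_natCast en 0 n0
  have b2 : PySem.List.slice en (some (n0 : Int)) (some ((n0 : Int) + (n1 : Int))) = (en.drop n0).take n1 :=
    PySem.List.slice_natCast_add en n0 n1
  have b3 : PySem.List.slice en (some ((n0 : Int) + (n1 : Int))) (some ((n0 : Int) + (n1 : Int) + (n2 : Int)))
      = (en.drop (n0 + n1)).take n2 := by
    have := PySem.List.slice_natCast_add en (n0 + n1) n2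
    push_cast at this
    simpa [add_assoc] using this
  rw [b1, b2, b3]
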